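-- pv_equiv track=rewrite | github.com/pyember/ember | src/ember/core/config/loader.py | _normalize_env_key
-- ===== SOURCE A (Python) =====
-- from typing import Dict, Any, Optional, List
--
-- def _normalize_env_key(env_key: str) -> List[str]:
--     """Normalize environment variable key to configuration path.
--
--     Args:
--         env_key: Environment variable key without prefix (e.g., "REGISTRY_AUTO_DISCOVER")
--
--     Returns:
--         List of path segments (e.g., ["registry", "auto_discover"])
--     """
--     # Custom mapping for well-known keys
--     key_mappings = {
--         "REGISTRY_AUTO_DISCOVER": ["registry", "auto_discover"],
--         "LOGGING_LEVEL": ["logging", "level"]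
--     }
--
--     # Check for exact matches first
--     if env_key in key_mappings:
--         return key_mappings[env_key]
--
--     # Default behavior: convert to lowercase and split by underscore
--     path = env_key.lower().split("_")
--
--     # Handle compound words that should stay together
--     compound_words = ["auto_discover", "rate_limit", "api_key", "api_keys", "cost_input", "cost_output"]
--
--     # Check if any adjacent elements in path should be merged
--     i = 0
--     while i < len(path) - 1:
--         combined = f"{path[i]}_{path[i+1]}"
--         if combined in compound_words:
--             path[i] = combined  # Replace first element with combined
--             path.pop(i+1)       # Remove second element
--         else:
--             i += 1
--
--     return path
-- ===== SOURCE B (Python) =====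
-- from typing import List
--
-- _COMPOUND_WORDS = frozenset({"auto_discover", "rate_limit", "api_key", "api_keys", "cost_input", "cost_output"})
--
-- def _normalize_env_key(env_key: str) -> List[str]:
--     """Normalize environment variable key to configuration path.
--
--     Single forward pass over the lowercased segments, building a fresh list;
--     the special-key table of the original is dropped because both of its
--     entries coincide with the generic lowercase/split/merge result.
--     """
--     segs = env_key.lower().split("_")
--     out = []
--     j = 0
--     n = len(segs)
--     while j < n:
--         if j + 1 < n and segs[j] + "_" + segs[j + 1] in _COMPOUND_WORDS:
--             out.append(segs[j] + "_" + segs[j + 1])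
--             j += 2
--         else:
--             out.append(segs[j])
--             j += 1
--     return out
-- ===== Notes on version B (the rewrite author's own statement) =====
-- stated objective: simpler
-- what changed: Drops the special-key dict (both entries equal the generic result) and replaces the in-place while/pop merge with a single forward scan that builds a fresh list, advancing by 2 over a matched compound.
import Mathlib
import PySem

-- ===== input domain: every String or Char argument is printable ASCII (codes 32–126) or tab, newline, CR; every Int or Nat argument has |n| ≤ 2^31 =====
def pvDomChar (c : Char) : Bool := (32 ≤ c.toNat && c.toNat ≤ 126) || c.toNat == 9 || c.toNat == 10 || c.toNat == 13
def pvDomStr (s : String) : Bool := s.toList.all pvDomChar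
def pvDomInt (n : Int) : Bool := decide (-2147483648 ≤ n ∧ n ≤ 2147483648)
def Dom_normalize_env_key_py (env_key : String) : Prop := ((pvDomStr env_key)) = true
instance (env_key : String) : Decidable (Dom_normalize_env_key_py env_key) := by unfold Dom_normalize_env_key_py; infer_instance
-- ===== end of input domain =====

-- B drops A's redundant special-key dict (both entries equal the generic result) and builds a
-- fresh list in one forward scan instead of A's in-place while/pop merge (objective: simpler).

-- ===== PORT A =====
def pvCompounds : List String :=
  ["auto_discover", "rate_limit", "api_key", "api_keys", "cost_input", "cost_output"]

def pvKeyMappings : PySem.Dict String (List String) :=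
  (PySem.Dict.empty.insert "REGISTRY_AUTO_DISCOVER" ["registry", "auto_discover"]).insert
    "LOGGING_LEVEL" ["logging", "level"]

-- A's while/pop loop; Python's path[i] with 0 ≤ i < len is exactly List.getD under the guard
def pvAMerge (path : List String) (i : Nat) : List String :=
  if _h : i + 1 < path.length then
    let combined := path.getD i "" ++ "_" ++ path.getD (i + 1) ""
    if combined ∈ pvCompounds then
      pvAMerge ((path.set i combined).eraseIdx (i + 1)) i
    else
      pvAMerge path (i + 1)
  else path
termination_by path.length - i
decreasing_by
  · simp [List.length_eraseIdx, List.length_set, _h]; omega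
  · omega

-- env_key.lower().split("_"): the separator "_" is a nonempty literal, so split? is always some; .getD [] is exact here
def normalize_env_key_py (env_key : String) : List String :=
  match pvKeyMappings.get? env_key with
  | some v => v
  | none => pvAMerge ((PySem.Str.split? (PySem.Str.lower env_key) "_").getD []) 0

-- ===== PORT B =====
def pvCompoundSet : PySem.Set String := PySem.Set.ofList
  ["auto_discover", "rate_limit", "api_key", "api_keys", "cost_input", "cost_output"]

-- B's single forward scan building the output list
def pvBScan (segs : List String) (j : Nat) (out : List String) : List String :=
  if _h : j < segs.length then
    if j + 1 < segs.length ∧ (segs.getD j "" ++ "_" ++ segs.getD (j + 1) "") ∈ pvCompoundSet then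
      pvBScan segs (j + 2) (out ++ [segs.getD j "" ++ "_" ++ segs.getD (j + 1) ""])
    else
      pvBScan segs (j + 1) (out ++ [segs.getD j ""])
  else out
termination_by segs.length - j

def normalize_env_key_py_alt (env_key : String) : List String :=
  pvBScan ((PySem.Str.split? (PySem.Str.lower env_key) "_").getD []) 0 []

-- ===== PRECONDITION & SPEC =====
def Spec_normalize_env_key_py (env_key : String) (out : List String) : Prop := out = normalize_env_key_py_alt env_key
instance (env_key : String) (out : List String) : Decidable (Spec_normalize_env_key_py env_key out) := by unfold Spec_normalize_env_key_py; infer_instance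

-- ===== CLAIM (what is proved, stated in full; the proofs are below) =====
def Claim_equal_normalize_env_key_py : Prop := ∀ (env_key : String), Dom_normalize_env_key_py env_key → Spec_normalize_env_key_py env_key (normalize_env_key_py env_key)

-- ===== LEMMAS AND PROOFS =====

-- reference greedy scan both loops are proved equal to
def pvG : List String → List String
  | [] => []
  | [x] => [x]
  | x :: y :: rest =>
    if (x ++ "_" ++ y) ∈ pvCompounds then (x ++ "_" ++ y) :: pvG rest
    else x :: pvG (y :: rest)

lemma pvCompound_count (c : String) (hc : c ∈ pvCompounds) : c.toList.count '_' = 1 := by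
  fin_cases hc <;> decide

-- a merged element (a compound, one '_') never re-merges with its new neighbour
lemma pvNoRematch (c z : String) (hc : c ∈ pvCompounds) : (c ++ "_" ++ z) ∉ pvCompounds := by
  intro h
  have h1 := pvCompound_count c hc
  have h2 := pvCompound_count _ h
  simp [List.count_append] at h2
  omega

lemma pvG_compound (c : String) (hc : c ∈ pvCompounds) (rest : List String) :
    pvG (c :: rest) = c :: pvG rest := by
  cases rest with
  | nil => rfl
  | cons z t => simp [pvG, pvNoRematch c z hc]

lemma pvSet_append (pre : List String) (x c : String) (t : List String) :
    ((pre ++ x :: t).set pre.length c) = pre ++ c :: t := by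
  induction pre with
  | nil => rfl
  | cons a pre ih => simp [ih]

lemma pvEraseIdx_append (pre : List String) (c y : String) (t : List String) :
    ((pre ++ c :: y :: t).eraseIdx (pre.length + 1)) = pre ++ c :: t := by
  induction pre with
  | nil => rfl
  | cons a pre ih => simpa [List.eraseIdx] using ih

lemma pvGetD_append (pre : List String) (l : List String) (k : Nat) :
    (pre ++ l).getD (pre.length + k) "" = l.getD k "" := by
  induction pre with
  | nil => simp
  | cons a pre ih => simpa [List.getD, Nat.succ_add] using ih

lemma pvAMerge_eq : ∀ (n : Nat) (suf pre : List String), suf.length = n →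
    pvAMerge (pre ++ suf) pre.length = pre ++ pvG suf := by
  intro n
  induction n using Nat.strong_induction_on with
  | _ n ih =>
    intro suf pre hlen
    match suf with
    | [] =>
      rw [pvAMerge]
      simp [pvG]
    | [x] =>
      rw [pvAMerge]
      simp [pvG]
    | x :: y :: rest =>
      rw [pvAMerge]
      have hl : pre.length + 1 < (pre ++ x :: y :: rest).length := by
        simp only [List.length_append, List.length_cons]; omega
      have hx : (pre ++ x :: y :: rest).getD pre.length "" = x := by
        have := pvGetD_append pre (x :: y :: rest) 0
        simpa using this
      have hy : (pre ++ x :: y :: rest).getD (pre.length + 1) "" = y :=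
        pvGetD_append pre (x :: y :: rest) 1
      rw [dif_pos hl]
      simp only [hx, hy]
      by_cases hmem : (x ++ "_" ++ y) ∈ pvCompounds
      · rw [if_pos hmem, pvSet_append, pvEraseIdx_append]
        have := ih ((x ++ "_" ++ y) :: rest).length
          (by subst hlen; simp only [List.length_cons]; omega)
          ((x ++ "_" ++ y) :: rest) pre rfl
        rw [this, pvG_compound (x ++ "_" ++ y) hmem rest]
        simp [pvG, hmem]
      · rw [if_neg hmem]
        have := ih (y :: rest).length
          (by subst hlen; simp only [List.length_cons]; omega)
          (y :: rest) (pre ++ [x]) rfl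
        have hplen : (pre ++ [x]).length = pre.length + 1 := by simp
        rw [hplen] at this
        simp only [List.append_assoc, List.singleton_append] at this
        rw [this]
        simp [pvG, hmem]

lemma pvMemSet (s : String) : s ∈ pvCompoundSet ↔ s ∈ pvCompounds := by
  unfold pvCompoundSet pvCompounds
  rw [PySem.Set.mem_ofList]

lemma pvBScan_eq : ∀ (n : Nat) (segs : List String) (j : Nat) (out : List String),
    (segs.drop j).length = n → pvBScan segs j out = out ++ pvG (segs.drop j) := by
  intro n
  induction n using Nat.strong_induction_on with
  | _ n ih =>
    intro segs j out hlen
    rw [pvBScan]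
    by_cases hj : j < segs.length
    · rw [dif_pos hj]
      have hdrop : segs.drop j = segs[j] :: segs.drop (j + 1) := List.drop_eq_getElem_cons hj
      have hgj : segs.getD j "" = segs[j] := List.getD_eq_getElem segs "" hj
      by_cases hj1 : j + 1 < segs.length
      · have hdrop1 : segs.drop (j + 1) = segs[j + 1] :: segs.drop (j + 2) :=
          List.drop_eq_getElem_cons hj1
        have hgj1 : segs.getD (j + 1) "" = segs[j + 1] := List.getD_eq_getElem segs "" hj1
        by_cases hmem : (segs[j] ++ "_" ++ segs[j + 1]) ∈ pvCompounds
        · rw [if_pos ⟨hj1, by rw [hgj, hgj1, pvMemSet]; exact hmem⟩]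
          rw [ih (segs.drop (j + 2)).length
            (by subst hlen; simp only [List.length_drop]; omega) segs (j + 2) _ rfl]
          rw [hdrop, hdrop1, hgj, hgj1]
          simp [pvG, hmem]
        · rw [if_neg (by rw [hgj, hgj1, pvMemSet]; intro h; exact hmem h.2)]
          rw [ih (segs.drop (j + 1)).length
            (by subst hlen; simp only [List.length_drop]; omega) segs (j + 1) _ rfl]
          rw [hdrop, hdrop1, hgj]
          simp [pvG, hmem, ← hdrop1]
      · rw [if_neg (by intro h; exact hj1 h.1)]
        rw [ih (segs.drop (j + 1)).length
          (by subst hlen; simp only [List.length_drop]; omega) segs (j + 1) _ rfl]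
        have hnil : segs.drop (j + 1) = [] := List.drop_eq_nil_of_le (by omega)
        rw [hdrop, hgj, hnil]
        simp [pvG]
    · rw [dif_neg hj]
      rw [List.drop_eq_nil_of_le (by omega)]
      simp [pvG]

lemma pvAlt_eq (s : String) :
    normalize_env_key_py_alt s = pvG ((PySem.Str.split? (PySem.Str.lower s) "_").getD []) := by
  unfold normalize_env_key_py_alt
  simpa using pvBScan_eq _ ((PySem.Str.split? (PySem.Str.lower s) "_").getD []) 0 [] rfl

-- ===== VERDICT (by name: the statement is the Claim_ definition above) =====
theorem normalize_env_key_py_spec : Claim_equal_normalize_env_key_py := by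
  intro env_key _
  unfold Spec_normalize_env_key_py
  rw [pvAlt_eq]
  by_cases h1 : env_key = "LOGGING_LEVEL"
  · subst h1
    have hget : pvKeyMappings.get? "LOGGING_LEVEL" = some ["logging", "level"] := by decide
    unfold normalize_env_key_py
    rw [hget]
    decide
  · by_cases h2 : env_key = "REGISTRY_AUTO_DISCOVER"
    · subst h2
      have hget : pvKeyMappings.get? "REGISTRY_AUTO_DISCOVER" = some ["registry", "auto_discover"] := by decide
      unfold normalize_env_key_py
      rw [hget]
      decide
    · have hget : pvKeyMappings.get? env_key = none := by
        unfold pvKeyMappings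
        rw [PySem.Dict.get?_insert, PySem.Dict.get?_insert]
        simp [h1, h2, PySem.Dict.get?_empty]
      unfold normalize_env_key_py
      rw [hget]
      have := pvAMerge_eq ((PySem.Str.split? (PySem.Str.lower env_key) "_").getD []).length
        ((PySem.Str.split? (PySem.Str.lower env_key) "_").getD []) [] rfl
      simpa using this
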